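-- pv_equiv track=rewrite | github.com/Run-ux/Automated-Programming-Problem-Generation-with-Large-Models | ICPC题目提取schema/icpc_schema_extractor/normalize.py | _find_sections
-- ===== SOURCE A (Python) =====
-- from typing import Dict, Tuple
--
-- SECTION_HEADERS = [
--     "Input",
--     "Output",
--     "Constraints",
--     "Input Format",
--     "Output Format",
--     "Input Specification",
--     "Output Specification",
--     "Limits",
-- ]
--
-- def _find_sections(text: str) -> Dict[str, Tuple[int, int]]:
--     lines = text.split("\n")
--     indices = []
--     for i, line in enumerate(lines):
--         key = line.strip()
--         if not key:
--             continue
--         for h in SECTION_HEADERS: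
--             if key.lower() == h.lower():
--                 indices.append((i, h))
--                 break
--
--     # 按出现顺序构建区间
--     sections: Dict[str, Tuple[int, int]] = {}
--     for idx, (start_i, header) in enumerate(indices):
--         end_i = indices[idx + 1][0] if idx + 1 < len(indices) else len(lines)
--         sections[header] = (start_i + 1, end_i)
--     return sections
-- ===== SOURCE B (Python) =====
-- SECTION_HEADERS = [
--     "Input",
--     "Output",
--     "Constraints",
--     "Input Format",
--     "Output Format",
--     "Input Specification",
--     "Output Specification",
--     "Limits",
-- ]
--
-- def _canon(key):
--     kl = key.lower()
--     for h in SECTION_HEADERS: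
--         if kl == h.lower():
--             return h
--     return None
--
-- def _find_sections(text):
--     lines = text.split("\n")
--     sections = {}
--     open_header = None  # (start_index, canonical header) currently open
--     for i, line in enumerate(lines):
--         h = _canon(line.strip())
--         if h is not None:
--             if open_header is not None:
--                 pi, ph = open_header
--                 sections[ph] = (pi + 1, i)
--             open_header = (i, h)
--     if open_header is not None:
--         oi, oh = open_header
--         sections[oh] = (oi + 1, len(lines))
--     return sections
-- ===== Notes on version B (the rewrite author's own statement) =====
-- stated objective: alternative
-- what changed: Single fused pass over the lines that maintains the currently-open header and closes it (writing its range) when the next header or the end of input is reached, replacing A's intermediate indices list and its second ranging loop with index lookups.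
import Mathlib
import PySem

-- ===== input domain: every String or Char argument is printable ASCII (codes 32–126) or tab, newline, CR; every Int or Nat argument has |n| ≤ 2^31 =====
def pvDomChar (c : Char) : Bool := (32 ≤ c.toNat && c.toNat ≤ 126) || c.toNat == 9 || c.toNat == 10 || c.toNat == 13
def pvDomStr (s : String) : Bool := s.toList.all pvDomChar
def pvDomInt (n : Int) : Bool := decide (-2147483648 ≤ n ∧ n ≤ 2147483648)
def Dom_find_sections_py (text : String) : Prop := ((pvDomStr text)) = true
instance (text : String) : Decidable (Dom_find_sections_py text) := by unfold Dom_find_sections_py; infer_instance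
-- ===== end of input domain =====

-- B fuses A's two loops into one pass that keeps the currently-open header; same cost, different decomposition.

-- ===== PORT A =====
def SECTION_HEADERS : List String :=
  ["Input", "Output", "Constraints", "Input Format", "Output Format",
   "Input Specification", "Output Specification", "Limits"]

-- the inner 'for h in SECTION_HEADERS: … break' loop of both Pythons (first match wins)
def headerMatch (key : String) : Option String :=
  SECTION_HEADERS.find? (fun h => PySem.Str.lower key == PySem.Str.lower h)

def find_sections_py (text : String) : List (String × Int × Int) :=
  let lines := (PySem.Str.split? text "\n").getD []
  let indices := (PySem.List.enumerate lines 0).foldl (fun acc p =>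
      let key := PySem.Str.strip p.2
      if key = "" then acc
      else match headerMatch key with
           | some h => acc ++ [(p.1, h)]
           | none => acc) []
  let sections := (PySem.List.enumerate indices 0).foldl (fun d q =>
      let end_i : Int := if q.1 + 1 < (indices.length : Int)
                         then (PySem.List.pyGetD indices (q.1 + 1) (0, "")).1
                         else (lines.length : Int)
      d.insert q.2.2 (q.2.1 + 1, end_i)) (PySem.Dict.empty : PySem.Dict String (Int × Int))
  sections.items

-- ===== PORT B =====
def find_sections_py_alt (text : String) : List (String × Int × Int) :=
  let lines := (PySem.Str.split? text "\n").getD []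
  let st := (PySem.List.enumerate lines 0).foldl
      (fun (st : PySem.Dict String (Int × Int) × Option (Int × String)) p =>
        match headerMatch (PySem.Str.strip p.2) with
        | some h =>
          match st.2 with
          | some op => (st.1.insert op.2 (op.1 + 1, p.1), some (p.1, h))
          | none => (st.1, some (p.1, h))
        | none => st)
      ((PySem.Dict.empty : PySem.Dict String (Int × Int)), none)
  let sections := match st.2 with
                  | some op => st.1.insert op.2 (op.1 + 1, (lines.length : Int))
                  | none => st.1
  sections.items

-- ===== PRECONDITION & SPEC =====
def Spec_find_sections_py (text : String) (out : List (String × Int × Int)) : Prop := out = find_sections_py_alt text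
instance (text : String) (out : List (String × Int × Int)) : Decidable (Spec_find_sections_py text out) := by unfold Spec_find_sections_py; infer_instance

-- ===== CLAIM (what is proved, stated in full; the proofs are below) =====
def Claim_equal_find_sections_py : Prop := ∀ (text : String), Dom_find_sections_py text → Spec_find_sections_py text (find_sections_py text)

-- ===== LEMMAS AND PROOFS =====

-- the pair (index, canonical header) a line contributes, if any
def lineHit (p : Int × String) : Option (Int × String) :=
  (headerMatch (PySem.Str.strip p.2)).map (fun h => (p.1, h))

-- the insert sequence both programs perform: close each header at the next one's index, the last at n
def closePairs : List (Int × String) → Int → List (String × Int × Int)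
  | [], _ => []
  | [(i, h)], n => [(h, i + 1, n)]
  | (i, h) :: (j, h') :: rest, n => (h, i + 1, j) :: closePairs ((j, h') :: rest) n

def insTriple (d : PySem.Dict String (Int × Int)) (t : String × Int × Int) :
    PySem.Dict String (Int × Int) := d.insert t.1 t.2

-- B's loop body on a matched pair
def stepB' (st : PySem.Dict String (Int × Int) × Option (Int × String)) (q : Int × String) :
    PySem.Dict String (Int × Int) × Option (Int × String) :=
  match st.2 with
  | some op => (st.1.insert op.2 (op.1 + 1, q.1), some q)
  | none => (st.1, some q)

theorem headerMatch_empty : headerMatch "" = none := by decide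

theorem pyGetD_mid (pre : List (Int × String)) (x y : Int × String) (rest : List (Int × String)) :
    PySem.List.pyGetD (pre ++ x :: y :: rest) ((pre.length : Int) + 1) (0, "") = y := by
  have h1 : ((pre.length : Int) + 1) = ((pre.length + 1 : Nat) : Int) := by push_cast; ring
  rw [h1, PySem.List.pyGetD_natCast]
  simp [List.getD]

theorem foldA (n : Int) (full : List (Int × String)) :
    ∀ (suf pre : List (Int × String)), full = pre ++ suf →
      ∀ (d : PySem.Dict String (Int × Int)),
        (PySem.List.enumerate suf (pre.length : Int)).foldl (fun d q =>
            d.insert q.2.2 (q.2.1 + 1,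
              if q.1 + 1 < (full.length : Int)
              then (PySem.List.pyGetD full (q.1 + 1) (0, "")).1
              else n)) d
          = (closePairs suf n).foldl insTriple d := by
  intro suf
  induction suf with
  | nil => intro pre _ d; simp [closePairs, PySem.List.enumerate_nil]
  | cons x t ih =>
    intro pre hfull d
    cases t with
    | nil =>
      subst hfull
      simp [closePairs, PySem.List.enumerate_cons, PySem.List.enumerate_nil, insTriple]
    | cons y rest =>
      subst hfull
      have hc : (pre.length : Int) + 1 < ((pre ++ x :: y :: rest).length : Int) := by
        simp only [List.length_append, List.length_cons]
        push_cast; omega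
      have hstart : (pre.length : Int) + 1 = (((pre ++ [x]).length : Nat) : Int) := by
        simp [List.length_append]
      have happ : pre ++ x :: y :: rest = (pre ++ [x]) ++ y :: rest := by simp
      rw [PySem.List.enumerate_cons, List.foldl_cons]
      simp only [hc, if_pos, pyGetD_mid]
      rw [hstart, ih (pre ++ [x]) happ]
      rcases x with ⟨i, h⟩; rcases y with ⟨j, h'⟩
      simp [closePairs, insTriple]

theorem foldB (n : Int) :
    ∀ (idxs : List (Int × String)) (q : Int × String) (d : PySem.Dict String (Int × Int)),
      (match (idxs.foldl stepB' (d, some q)).2 with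
       | some op => (idxs.foldl stepB' (d, some q)).1.insert op.2 (op.1 + 1, n)
       | none => (idxs.foldl stepB' (d, some q)).1)
        = (closePairs (q :: idxs) n).foldl insTriple d := by
  intro idxs
  induction idxs with
  | nil =>
    intro q d
    rcases q with ⟨i, h⟩
    simp [closePairs, insTriple]
  | cons r rest ih =>
    intro q d
    rw [List.foldl_cons]
    have hstep : stepB' (d, some q) r = (d.insert q.2 (q.1 + 1, r.1), some r) := rfl
    rw [hstep, ih r (d.insert q.2 (q.1 + 1, r.1))]
    rcases q with ⟨i, h⟩; rcases r with ⟨j, h'⟩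
    simp [closePairs, insTriple]

theorem bodyA_eq (acc : List (Int × String)) (p : Int × String) :
    (if PySem.Str.strip p.2 = "" then acc
     else match headerMatch (PySem.Str.strip p.2) with
          | some h => acc ++ [(p.1, h)]
          | none => acc)
    = (match lineHit p with | some y => acc ++ [y] | none => acc) := by
  by_cases hk : PySem.Str.strip p.2 = ""
  · simp [lineHit, hk, headerMatch_empty]
  · simp only [hk, lineHit]
    cases headerMatch (PySem.Str.strip p.2) <;> simp

theorem bodyB_eq (st : PySem.Dict String (Int × Int) × Option (Int × String)) (p : Int × String) :
    (match headerMatch (PySem.Str.strip p.2) with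
     | some h =>
       match st.2 with
       | some op => (st.1.insert op.2 (op.1 + 1, p.1), some (p.1, h))
       | none => (st.1, some (p.1, h))
     | none => st)
    = (match lineHit p with | some y => stepB' st y | none => st) := by
  simp only [lineHit]
  cases headerMatch (PySem.Str.strip p.2) with
  | none => rfl
  | some h => cases hst : st.2 <;> simp [stepB', hst]

theorem indicesA (lines : List String) :
    (PySem.List.enumerate lines 0).foldl (fun acc p =>
        if PySem.Str.strip p.2 = "" then acc
        else match headerMatch (PySem.Str.strip p.2) with
             | some h => acc ++ [(p.1, h)]
             | none => acc) []
      = (PySem.List.enumerate lines 0).filterMap lineHit := by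
  suffices h : ∀ (l : List (Int × String)) (acc : List (Int × String)),
      l.foldl (fun acc p =>
        if PySem.Str.strip p.2 = "" then acc
        else match headerMatch (PySem.Str.strip p.2) with
             | some h => acc ++ [(p.1, h)]
             | none => acc) acc = acc ++ l.filterMap lineHit by
    simpa using h (PySem.List.enumerate lines 0) []
  intro l
  induction l with
  | nil => simp
  | cons x t ih =>
    intro acc
    rw [List.foldl_cons, List.filterMap_cons]
    have hb := bodyA_eq acc x
    cases hx : lineHit x with
    | none => rw [hx] at hb; simp only [hb]; simp [ih]
    | some y => rw [hx] at hb; simp only [hb]; simp [ih]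

theorem stB (lines : List String) :
    (PySem.List.enumerate lines 0).foldl
        (fun (st : PySem.Dict String (Int × Int) × Option (Int × String)) p =>
          match headerMatch (PySem.Str.strip p.2) with
          | some h =>
            match st.2 with
            | some op => (st.1.insert op.2 (op.1 + 1, p.1), some (p.1, h))
            | none => (st.1, some (p.1, h))
          | none => st)
        ((PySem.Dict.empty : PySem.Dict String (Int × Int)), none)
      = ((PySem.List.enumerate lines 0).filterMap lineHit).foldl stepB'
          (PySem.Dict.empty, none) := by
  suffices h : ∀ (l : List (Int × String))
      (st : PySem.Dict String (Int × Int) × Option (Int × String)),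
      l.foldl (fun st p =>
          match headerMatch (PySem.Str.strip p.2) with
          | some h =>
            match st.2 with
            | some op => (st.1.insert op.2 (op.1 + 1, p.1), some (p.1, h))
            | none => (st.1, some (p.1, h))
          | none => st) st = (l.filterMap lineHit).foldl stepB' st by
    exact h (PySem.List.enumerate lines 0) _
  intro l
  induction l with
  | nil => simp
  | cons x t ih =>
    intro st
    rw [List.foldl_cons, List.filterMap_cons]
    have hb := bodyB_eq st x
    cases hx : lineHit x with
    | none => rw [hx] at hb; simp only [hb]; simp [ih]
    | some y => rw [hx] at hb; simp only [hb]; simp [ih]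

theorem sectionsA (l : List (Int × String)) (n : Int) :
    (PySem.List.enumerate l 0).foldl (fun d q =>
        d.insert q.2.2 (q.2.1 + 1,
          if q.1 + 1 < (l.length : Int)
          then (PySem.List.pyGetD l (q.1 + 1) (0, "")).1
          else n)) PySem.Dict.empty
      = (closePairs l n).foldl insTriple PySem.Dict.empty := by
  have h0 : (0 : Int) = ((([] : List (Int × String)).length : Nat) : Int) := by simp
  rw [h0]
  exact foldA n l l [] (by simp) PySem.Dict.empty

theorem finalEq (idxs : List (Int × String)) (n : Int) :
    ((closePairs idxs n).foldl insTriple PySem.Dict.empty).items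
      = (match (idxs.foldl stepB' ((PySem.Dict.empty : PySem.Dict String (Int × Int)), none)).2 with
         | some op => (idxs.foldl stepB' (PySem.Dict.empty, none)).1.insert op.2 (op.1 + 1, n)
         | none => (idxs.foldl stepB' (PySem.Dict.empty, none)).1).items := by
  cases idxs with
  | nil => simp [closePairs]
  | cons q rest =>
    rw [List.foldl_cons]
    have hstep0 : stepB' (PySem.Dict.empty, none) q = (PySem.Dict.empty, some q) := rfl
    rw [hstep0, foldB n rest q PySem.Dict.empty]

-- ===== VERDICT (by name: the statement is the Claim_ definition above) =====
set_option maxHeartbeats 1000000 in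
theorem find_sections_py_spec : Claim_equal_find_sections_py := by
  intro text _
  show find_sections_py text = find_sections_py_alt text
  unfold find_sections_py find_sections_py_alt
  simp only [indicesA, stB, sectionsA]
  exact finalEq _ _
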